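-- pv_equiv track=rewrite | github.com/Dahyunne/Algorithm | programmers/new_id.py | solution
-- ===== SOURCE A (Python) =====
-- import string
--
-- def solution(new_id):
--     answer = ''
--     answer = new_id.lower() #1단계
--
--     symbols = string.punctuation.replace('-', '').replace('_', '').replace('.', '')
--     for symbol in symbols:
--         answer = answer.replace(symbol, "") #2단계
--
--     stack = []
--     for s in answer:
--         if len(stack) == 0 or len(stack) == 1:
--             stack.append(s)
--         else:
--             if s == stack[-1] and s == '.':
--                 stack.pop()
--                 stack.append('.')
--             else:
--                 stack.append(s)
--     answer = ''.join(map(str, stack))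
--     #3단계
--
--     answer = answer.lstrip('.').rstrip('.')  #4단계
--
--     if len(answer)==0:
--         answer = 'a'    #5단계
--
--     if len(answer) > 15:
--         answer = answer[:15]
--         if answer[-1] == '.':
--             answer = answer.rstrip('.')  #6단계
--
--     if len(answer) < 3:
--         while True:
--             answer = answer + answer[-1]
--             if len(answer) == 3: break  #7단계
--     return answer
-- ===== SOURCE B (Python) =====
-- import string
--
-- def solution(new_id):
--     bad = set(string.punctuation) - {'-', '_', '.'}
--     out = []
--     for ch in new_id.lower():          # steps 1-3 fused in one pass
--         if ch in bad:
--             continue                   # step 2: drop forbidden punctuation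
--         if ch == '.' and out and out[-1] == '.':
--             continue                   # step 3: collapse runs of dots
--         out.append(ch)
--     s = ''.join(out).strip('.')        # step 4
--     if not s:
--         s = 'a'                        # step 5
--     s = s[:15].rstrip('.')             # step 6
--     s += s[-1] * (3 - len(s))          # step 7
--     return s
-- ===== Notes on version B (the rewrite author's own statement) =====
-- stated objective: faster
-- what changed: A makes 29 whole-string replace() passes to delete punctuation and then a separate stack pass to collapse dot runs; B deletes punctuation and collapses dot runs in one single pass over the string, and replaces the step-7 while loop by arithmetic padding s[-1]*(3-len(s)).
import Mathlib
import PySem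

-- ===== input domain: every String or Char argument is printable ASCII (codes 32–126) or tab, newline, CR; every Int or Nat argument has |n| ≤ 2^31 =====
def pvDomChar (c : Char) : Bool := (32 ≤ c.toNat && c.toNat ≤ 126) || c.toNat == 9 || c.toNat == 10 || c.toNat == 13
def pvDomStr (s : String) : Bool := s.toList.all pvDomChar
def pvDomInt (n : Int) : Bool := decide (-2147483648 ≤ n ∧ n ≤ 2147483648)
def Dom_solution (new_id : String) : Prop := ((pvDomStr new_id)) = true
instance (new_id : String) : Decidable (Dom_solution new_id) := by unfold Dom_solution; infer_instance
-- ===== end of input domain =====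

-- B fuses A's 29 whole-string replace passes and the dot-collapsing stack into one pass over the
-- string; same return value, claimed objective: faster by a constant factor (one traversal).

-- ===== PORT A =====
-- string.punctuation
def pvPunct : List Char := "!\"#$%&'()*+,-./:;<=>?@[\\]^_`{|}~".toList

-- symbols = string.punctuation.replace('-','').replace('_','').replace('.','')
def pvSymbols : List Char :=
  PySem.Chars.replace (PySem.Chars.replace (PySem.Chars.replace pvPunct ['-'] []) ['_'] []) ['.'] []

-- answer.lstrip('.') / answer.rstrip('.') — exact for this single-character strip set
def pvLstripDot (l : List Char) : List Char := l.dropWhile (· == '.')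
def pvRstripDot (l : List Char) : List Char := (l.reverse.dropWhile (· == '.')).reverse

-- one iteration of A's stack loop; the stack is kept reversed (head = Python's stack[-1])
def pvStep (st : List Char) (s : Char) : List Char :=
  match st with
  | [] => [s]                                      -- len(stack) == 0
  | [a] => [s, a]                                  -- len(stack) == 1
  | a :: t => if s = a ∧ s = '.' then '.' :: t     -- pop, then append '.'
              else s :: a :: t

-- step 7's while loop: appends answer[-1] until the length is 3; it runs at most twice
-- (the guard gives length < 3), so fuel 3 is enough.  answer[-1] = getLastD (nonempty after step 5).
def pvGrow : Nat → List Char → List Char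
  | 0, l => l
  | n + 1, l =>
    let l' := l ++ [l.getLastD 'a']
    if l'.length = 3 then l' else pvGrow n l'

def solution (new_id : String) : String :=
  let a1 := PySem.Chars.lower new_id.toList                                   -- step 1
  let a2 := pvSymbols.foldl (fun ans sym => PySem.Chars.replace ans [sym] []) a1   -- step 2
  let a3 := (a2.foldl pvStep []).reverse                                      -- step 3 (''.join(stack))
  let a4 := pvRstripDot (pvLstripDot a3)                                      -- step 4
  let a5 := if a4.length = 0 then ['a'] else a4                               -- step 5
  let a6 := if a5.length > 15 then                                            -- step 6
      let t := PySem.List.slice a5 none (some 15)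
      if PySem.List.pyGet? t (-1) = some '.' then pvRstripDot t else t
    else a5
  let a7 := if a6.length < 3 then pvGrow 3 a6 else a6                         -- step 7
  String.ofList a7

-- ===== PORT B =====
-- bad = set(string.punctuation) - {'-', '_', '.'}
def pvBad : PySem.Set Char :=
  PySem.Set.diff (PySem.Set.ofList "!\"#$%&'()*+,-./:;<=>?@[\\]^_`{|}~".toList) ['-', '_', '.']

-- body of B's single loop, for a character that is not dropped; out is kept reversed
def pvCore (out : List Char) (ch : Char) : List Char :=
  match out with
  | p :: t => if ch = '.' ∧ p = '.' then p :: t else ch :: p :: t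
  | [] => [ch]

def pvStepB (out : List Char) (ch : Char) : List Char :=
  if PySem.Set.contains pvBad ch then out else pvCore out ch

def solution_alt (new_id : String) : String :=
  let out := (PySem.Chars.lower new_id.toList).foldl pvStepB []
  let s0 := PySem.Chars.stripChars out.reverse ['.']                          -- ''.join(out).strip('.')
  let s1 := if s0 = [] then ['a'] else s0
  let s2 := pvRstripDot (PySem.List.slice s1 none (some 15))                  -- s[:15].rstrip('.')
  String.ofList (s2 ++ PySem.List.pyRepeat [s2.getLastD ' '] (3 - (s2.length : Int)))  -- s += s[-1]*(3-len(s))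

-- ===== PRECONDITION & SPEC =====
def Spec_solution (new_id : String) (out : String) : Prop := out = solution_alt new_id
instance (new_id : String) (out : String) : Decidable (Spec_solution new_id out) := by unfold Spec_solution; infer_instance

-- ===== CLAIM (what is proved, stated in full; the proofs are below) =====
def Claim_equal_solution : Prop := ∀ (new_id : String), Dom_solution new_id → Spec_solution new_id (solution new_id)

-- ===== LEMMAS AND PROOFS =====

-- step 2: replacing a single character by '' is filtering it out
lemma pv_go_spec (sym : Char) : ∀ (fuel : Nat) (l acc : List Char), l.length ≤ fuel →
    PySem.Chars.replace.go [sym] [] fuel l acc = acc.reverse ++ l.filter (fun c => !(c == sym)) := by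
  intro fuel
  induction fuel with
  | zero =>
      intro l acc h
      have : l = [] := by cases l <;> simp_all
      subst this
      simp [PySem.Chars.replace.go]
  | succ n ih =>
      intro l acc h
      cases l with
      | nil => simp [PySem.Chars.replace.go]
      | cons c t =>
          rw [PySem.Chars.replace.go]
          by_cases hc : c = sym
          · subst hc
            rw [if_pos (by simp [List.isPrefixOf])]
            simp only [List.length_cons] at h
            rw [ih _ _ (by simpa using Nat.le_of_succ_le_succ h)]
            simp
          · rw [if_neg (by simp [List.isPrefixOf]; exact fun e => hc e.symm)]
            simp only [List.length_cons] at h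
            rw [ih _ _ (Nat.le_of_succ_le_succ h)]
            simp [hc]

lemma pv_replace_filter (l : List Char) (sym : Char) :
    PySem.Chars.replace l [sym] [] = l.filter (fun c => !(c == sym)) := by
  rw [PySem.Chars.replace]
  rw [if_neg (by simp)]
  simpa using pv_go_spec sym l.length l [] le_rfl

-- a fold of single-character removals is one filter
lemma pv_fold_filter : ∀ (syms l : List Char),
    syms.foldl (fun ans sym => PySem.Chars.replace ans [sym] []) l
      = l.filter (fun c => !(syms.contains c)) := by
  intro syms
  induction syms with
  | nil => intro l; simp
  | cons s rest ih =>
      intro l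
      simp only [List.foldl_cons]
      rw [pv_replace_filter, ih, List.filter_filter]
      congr 1
      funext c
      by_cases hc : c = s <;> simp [hc]

-- the two literal symbol lists coincide
lemma pv_bad_eq : pvBad = pvSymbols := by decide

-- B's fused loop = B's core loop on the filtered string
lemma pv_fuse (l : List Char) :
    l.foldl pvStepB [] = (l.filter (fun c => !(pvSymbols.contains c))).foldl pvCore [] := by
  have hstep : pvStepB = fun (out : List Char) (ch : Char) =>
      if (!(pvSymbols.contains ch)) = true then pvCore out ch else out := by
    funext out ch
    simp only [pvStepB, PySem.Set.contains, pv_bad_eq]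
    cases h : pvSymbols.contains ch <;> simp_all
  rw [hstep, PySem.List.foldl_if_eq_foldl_filter]

-- A's stack loop vs B's core loop, once both stacks hold ≥ 2 characters (suf is dead weight at the
-- bottom of A's stack that B has already collapsed away)
lemma pv_stack_aux : ∀ (l : List Char) (p : Char) (t suf : List Char), (t ≠ [] ∨ suf ≠ []) →
    List.foldl pvStep ((p :: t) ++ suf) l = (List.foldl pvCore (p :: t) l) ++ suf := by
  intro l
  induction l with
  | nil => intro p t suf h; rfl
  | cons s rest ih =>
      intro p t suf h
      have hne : t ++ suf ≠ [] := by
        rcases h with h | h <;> simp [h]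
      obtain ⟨b, u, hbu⟩ : ∃ b u, t ++ suf = b :: u := by
        cases htu : t ++ suf with
        | nil => exact absurd htu hne
        | cons b u => exact ⟨b, u, rfl⟩
      simp only [List.foldl_cons]
      by_cases hc : s = '.' ∧ p = '.'
      · have h1 : pvStep (p :: t ++ suf) s = p :: t ++ suf := by
          simp only [List.cons_append, hbu, pvStep]
          rw [if_pos ⟨hc.2 ▸ hc.1, hc.1⟩]
          rw [hc.2]
        have h2 : pvCore (p :: t) s = p :: t := by
          simp only [pvCore]; rw [if_pos hc]
        rw [h1, h2]
        exact ih p t suf h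
      · have h1 : pvStep (p :: t ++ suf) s = s :: p :: t ++ suf := by
          simp only [List.cons_append, hbu, pvStep]
          rw [if_neg (by rintro ⟨e1, e2⟩; exact hc ⟨e2, e1 ▸ e2⟩)]
        have h2 : pvCore (p :: t) s = s :: p :: t := by
          simp only [pvCore]; rw [if_neg hc]
        rw [h1, h2]
        exact ih s (p :: t) suf (Or.inl (by simp))

-- A's stack output is B's, possibly with one extra '.' at the bottom (input beginning "..")
lemma pv_stack_top (l : List Char) :
    List.foldl pvStep [] l = List.foldl pvCore [] l
    ∨ List.foldl pvStep [] l = (List.foldl pvCore [] l) ++ ['.'] := by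
  match l with
  | [] => exact Or.inl rfl
  | [c] => exact Or.inl rfl
  | c0 :: c1 :: rest =>
      simp only [List.foldl_cons]
      have ha0 : pvStep [] c0 = [c0] := rfl
      have ha1 : pvStep [c0] c1 = [c1, c0] := rfl
      have hb0 : pvCore [] c0 = [c0] := rfl
      rw [ha0, ha1, hb0]
      by_cases hc : c1 = '.' ∧ c0 = '.'
      · right
        have hb1 : pvCore [c0] c1 = [c0] := by simp only [pvCore]; rw [if_pos hc]
        rw [hb1, hc.1, hc.2]
        have := pv_stack_aux rest '.' [] ['.'] (Or.inr (by simp))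
        simpa using this
      · left
        have hb1 : pvCore [c0] c1 = [c1, c0] := by simp only [pvCore]; rw [if_neg hc]
        rw [hb1]
        have := pv_stack_aux rest c1 [c0] [] (Or.inl (by simp))
        simpa using this

-- strip('.') is lstrip('.') then rstrip('.')
lemma pv_strip_eq (l : List Char) :
    PySem.Chars.stripChars l ['.'] = pvRstripDot (pvLstripDot l) := by
  have hp : (fun c => List.contains ['.'] c) = (fun c : Char => c == '.') := by
    funext c; cases h : c == '.' <;> simp_all
  simp only [PySem.Chars.stripChars, hp]
  rfl

lemma pv_rstrip_of_last_ne (l : List Char) (h : l.getLast? ≠ some '.') : pvRstripDot l = l := by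
  unfold pvRstripDot
  rw [← List.head?_reverse] at h
  cases hr : l.reverse with
  | nil => simpa using congrArg List.reverse hr
  | cons a t =>
      rw [hr] at h
      simp at h
      have : (a == '.') = false := by simpa using h
      rw [List.dropWhile_cons_of_neg (by simp [this]), ← hr, List.reverse_reverse]

lemma pv_rstrip_prefix (l : List Char) : pvRstripDot l <+: l := by
  have h := List.dropWhile_suffix (l := l.reverse) (· == '.')
  have := h.reverse
  simpa using this

lemma pv_rstrip_last (l : List Char) : (pvRstripDot l).getLast? ≠ some '.' := by
  unfold pvRstripDot
  rw [List.getLast?_reverse]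
  intro h
  have := List.head?_dropWhile_not (· == '.') l.reverse
  rw [h] at this
  simp at this

lemma pv_lstrip_head (l : List Char) : (pvLstripDot l).head? ≠ some '.' := by
  unfold pvLstripDot
  intro h
  have := List.head?_dropWhile_not (· == '.') l
  rw [h] at this
  simp at this

-- step 7: the grow loop is appending 3 - len copies of the last character
lemma pv_pad (l : List Char) (h : l ≠ []) :
    (if l.length < 3 then pvGrow 3 l else l)
      = l ++ PySem.List.pyRepeat [l.getLastD ' '] (3 - (l.length : Int)) := by
  match l with
  | [a] => simp [pvGrow, PySem.List.pyRepeat]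
  | [a, b] => simp [pvGrow, PySem.List.pyRepeat]
  | a :: b :: c :: t =>
      rw [if_neg (by simp only [List.length_cons]; omega)]
      simp [PySem.List.pyRepeat]
      omega

lemma pv_neg_one (l : List Char) (h : l ≠ []) : PySem.List.pyGet? l (-1) = l.getLast? := by
  have hlen : 1 ≤ l.length := List.length_pos_iff.mpr h
  unfold PySem.List.pyGet? PySem.List.pyIdx?
  rw [if_neg (by omega), if_pos (by omega)]
  simp [List.getLast?_eq_getElem?]

lemma pv_strip_head (l : List Char) : (pvRstripDot (pvLstripDot l)).head? ≠ some '.' := by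
  have hpre := pv_rstrip_prefix (pvLstripDot l)
  cases hm : pvRstripDot (pvLstripDot l) with
  | nil => simp
  | cons a t =>
      rw [hm] at hpre
      obtain ⟨u, hu⟩ := hpre
      have ha : (pvLstripDot l).head? = some a := by rw [← hu]; rfl
      intro hcontr
      simp only [List.head?_cons, Option.some.injEq] at hcontr
      subst hcontr
      exact pv_lstrip_head l ha

-- steps 5-7 agree on any string with no leading and no trailing dot
lemma pv_tail (m : List Char) (hh : m.head? ≠ some '.') (hl : m.getLast? ≠ some '.') :
    (let a5 := if m.length = 0 then ['a'] else m;
     let a6 := if a5.length > 15 then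
         (let t := PySem.List.slice a5 none (some 15);
          if PySem.List.pyGet? t (-1) = some '.' then pvRstripDot t else t)
       else a5;
     if a6.length < 3 then pvGrow 3 a6 else a6)
    = (let s1 := if m = [] then ['a'] else m;
       let s2 := pvRstripDot (PySem.List.slice s1 none (some 15));
       s2 ++ PySem.List.pyRepeat [s2.getLastD ' '] (3 - (s2.length : Int))) := by
  cases m with
  | nil => decide
  | cons c m' =>
    dsimp only
    rw [if_neg (show ¬(c :: m').length = 0 by simp), if_neg (show ¬(c :: m') = [] by simp)]
    have hslice : PySem.List.slice (c :: m') none (some 15) = (c :: m').take 15 := by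
      rw [PySem.List.slice_to _ (by norm_num : (0:Int) ≤ 15)]
      rfl
    by_cases h15 : (c :: m').length > 15
    · rw [if_pos h15]
      rw [hslice]
      have htne : (c :: m').take 15 ≠ [] := by simp
      rw [pv_neg_one _ htne]
      have ha6 : (if ((c :: m').take 15).getLast? = some '.'
            then pvRstripDot ((c :: m').take 15) else (c :: m').take 15)
          = pvRstripDot ((c :: m').take 15) := by
        by_cases hlast : ((c :: m').take 15).getLast? = some '.'
        · rw [if_pos hlast]
        · rw [if_neg hlast, pv_rstrip_of_last_ne _ hlast]
      rw [ha6]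
      have hne : pvRstripDot ((c :: m').take 15) ≠ [] := by
        intro he
        unfold pvRstripDot at he
        have h2 : ((c :: m').take 15).reverse.dropWhile (· == '.') = [] := by
          have := congrArg List.reverse he
          simpa using this
        rw [List.dropWhile_eq_nil_iff] at h2
        have hc : c ∈ ((c :: m').take 15).reverse := by simp
        have := h2 _ hc
        simp at this
        subst this
        simp at hh
      exact pv_pad _ hne
    · rw [if_neg h15]
      rw [hslice, List.take_of_length_le (by omega), pv_rstrip_of_last_ne _ hl]
      exact pv_pad _ (by simp)

-- ===== VERDICT (by name: the statement is the Claim_ definition above) =====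
theorem solution_spec : Claim_equal_solution := by
  intro new_id _
  unfold Spec_solution solution solution_alt
  dsimp only
  rw [pv_fold_filter, pv_fuse, pv_strip_eq]
  rcases pv_stack_top ((PySem.Chars.lower new_id.toList).filter (fun c => !(pvSymbols.contains c))) with h | h
  · rw [h]
    exact congrArg _ (pv_tail _ (pv_strip_head _) (pv_rstrip_last _))
  · rw [h, List.reverse_append]
    have hls : pvLstripDot (['.'].reverse ++ (List.foldl pvCore []
        ((PySem.Chars.lower new_id.toList).filter (fun c => !(pvSymbols.contains c)))).reverse)
        = pvLstripDot ((List.foldl pvCore []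
        ((PySem.Chars.lower new_id.toList).filter (fun c => !(pvSymbols.contains c)))).reverse) := by
      simp only [List.reverse_cons, List.reverse_nil, List.nil_append, List.cons_append]
      exact List.dropWhile_cons_of_pos (by simp)
    rw [hls]
    exact congrArg _ (pv_tail _ (pv_strip_head _) (pv_rstrip_last _))
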